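-- pv_equiv track=rewrite | github.com/gkynajru/augmentation_data | src/utils.py | create_entity_mapping
-- ===== SOURCE A (Python) =====
-- from typing import List, Dict, Any, Optional
--
-- def create_entity_mapping(data: List[Dict]) -> Dict[str, int]:
--     """
--     Create entity type to ID mapping
--
--     Args:
--         data: Dataset
--
--     Returns:
--         Entity type mapping
--     """
--     entity_types = set()
--
--     for item in data:
--         for entity in item.get('entities', []):
--             if isinstance(entity, dict) and 'type' in entity:
--                 entity_types.add(entity['type'])
--
--     # Create mapping with 'O' as first label
--     mapping = {'O': 0}
--
--     for i, entity_type in enumerate(sorted(entity_types), 1):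
--         mapping[f'B-{entity_type}'] = i * 2 - 1
--         mapping[f'I-{entity_type}'] = i * 2
--
--     return mapping
-- ===== SOURCE B (Python) =====
-- def _add(order, t):
--     """Insert t into the strictly increasing list 'order', keeping it sorted and duplicate-free."""
--     if not order or t < order[0]:
--         return [t] + order
--     if t == order[0]:
--         return order
--     return order[:1] + _add(order[1:], t)
--
--
-- def _pairs(ts, i):
--     """Association pairs for the sorted types ts, ids counted from 2*i-1."""
--     if not ts:
--         return []
--     return [('B-' + ts[0], 2 * i - 1), ('I-' + ts[0], 2 * i)] + _pairs(ts[1:], i + 1)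
--
--
-- def create_entity_mapping(data):
--     order = []
--     for item in data:
--         for entity in item.get('entities', []):
--             if isinstance(entity, dict) and 'type' in entity:
--                 order = _add(order, entity['type'])
--     return dict([('O', 0)] + _pairs(order, 1))
-- ===== Notes on version B (the rewrite author's own statement) =====
-- stated objective: alternative
-- what changed: B drops the set/sorted()/enumerate machinery entirely: it maintains a sorted duplicate-free list online by recursive ordered insertion during the single collection pass, builds the label-id association pairs by structural recursion over that list, and produces the result with a single dict() constructor call over the O-first pair list.
import Mathlib
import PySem

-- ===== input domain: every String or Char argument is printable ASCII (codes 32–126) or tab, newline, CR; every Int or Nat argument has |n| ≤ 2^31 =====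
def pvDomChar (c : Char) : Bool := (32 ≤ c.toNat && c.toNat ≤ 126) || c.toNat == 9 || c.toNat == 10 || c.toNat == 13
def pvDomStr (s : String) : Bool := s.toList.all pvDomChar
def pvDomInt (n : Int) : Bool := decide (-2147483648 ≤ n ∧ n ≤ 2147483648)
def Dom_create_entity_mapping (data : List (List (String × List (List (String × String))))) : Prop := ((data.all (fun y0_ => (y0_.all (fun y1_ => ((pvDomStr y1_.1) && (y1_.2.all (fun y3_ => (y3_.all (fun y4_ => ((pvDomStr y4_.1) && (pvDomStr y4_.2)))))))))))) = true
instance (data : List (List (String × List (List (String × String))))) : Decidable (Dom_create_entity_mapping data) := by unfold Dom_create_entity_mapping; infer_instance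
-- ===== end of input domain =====

-- B replaces A's set/sorted()/enumerate pipeline by online recursive ordered insertion during
-- the single collection pass, a structurally recursive (label, id) pair list, and one dict(...)
-- constructor call; objective: alternative (different algorithm, similar cost).

-- ===== PORT A =====
def create_entity_mapping (data : List (List (String × List (List (String × String))))) : List (String × Int) :=
  let entity_types : PySem.Set String :=
    data.foldl (fun s item =>
      ((PySem.Dict.mk item).getD "entities" []).foldl (fun s entity =>
        match (PySem.Dict.mk entity).get? "type" with
        | some t => PySem.Set.add s t
        | none => s) s) PySem.Set.empty
  let mapping : PySem.Dict String Int :=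
    (PySem.List.enumerate (PySem.List.sorted entity_types (fun x => x) false) 1).foldl
      (fun m p => (m.insert ("B-" ++ p.2) (p.1 * 2 - 1)).insert ("I-" ++ p.2) (p.1 * 2))
      (PySem.Dict.ofList [("O", 0)])
  mapping.items

-- ===== PORT B =====
-- _add: insert t into the strictly increasing list, keeping it sorted and duplicate-free
def pvAdd (order : List String) (t : String) : List String :=
  match order with
  | [] => [t]
  | h :: rest =>
    if t < h then t :: (h :: rest)
    else if t = h then h :: rest
    else h :: pvAdd rest t

-- _pairs: association pairs for the sorted types, ids counted from 2*i-1
def pvPairs (ts : List String) (i : Int) : List (String × Int) :=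
  match ts with
  | [] => []
  | t :: rest => ("B-" ++ t, 2 * i - 1) :: ("I-" ++ t, 2 * i) :: pvPairs rest (i + 1)

def create_entity_mapping_alt (data : List (List (String × List (List (String × String))))) : List (String × Int) :=
  let order : List String :=
    data.foldl (fun o item =>
      ((PySem.Dict.mk item).getD "entities" []).foldl (fun o entity =>
        match (PySem.Dict.mk entity).get? "type" with
        | some t => pvAdd o t
        | none => o) o) []
  (PySem.Dict.ofList (("O", 0) :: pvPairs order 1)).items

-- ===== PRECONDITION & SPEC =====
def Spec_create_entity_mapping (data : List (List (String × List (List (String × String))))) (out : List (String × Int)) : Prop := out = create_entity_mapping_alt data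
instance (data : List (List (String × List (List (String × String))))) (out : List (String × Int)) : Decidable (Spec_create_entity_mapping data out) := by unfold Spec_create_entity_mapping; infer_instance

-- ===== CLAIM (what is proved, stated in full; the proofs are below) =====
def Claim_equal_create_entity_mapping : Prop := ∀ (data : List (List (String × List (List (String × String))))), Dom_create_entity_mapping data → Spec_create_entity_mapping data (create_entity_mapping data)

-- ===== LEMMAS AND PROOFS =====

-- the flat list of 'type' occurrences both collection loops process, in order
def pvOcc (data : List (List (String × List (List (String × String))))) : List String :=
  data.flatMap (fun item =>
    ((PySem.Dict.mk item).getD "entities" []).filterMap (fun e => (PySem.Dict.mk e).get? "type"))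

-- the two B-/I- labels for one sorted entity type, with A's arithmetic ids
def pvF (p : Int × String) : List (String × Int) :=
  [("B-" ++ p.2, p.1 * 2 - 1), ("I-" ++ p.2, p.1 * 2)]

-- the flat B-/I- label list in order
def pvBody (ts : List String) : List String := ts.flatMap (fun t => ["B-" ++ t, "I-" ++ t])

theorem pvBInj {t1 t2 : String} (h : "B-" ++ t1 = "B-" ++ t2) : t1 = t2 := by
  have h2 := congrArg String.toList h
  simp at h2
  exact String.toList_injective h2

theorem pvIInj {t1 t2 : String} (h : "I-" ++ t1 = "I-" ++ t2) : t1 = t2 := by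
  have h2 := congrArg String.toList h
  simp at h2
  exact String.toList_injective h2

theorem pvBneI (t1 t2 : String) : "B-" ++ t1 ≠ "I-" ++ t2 := by
  intro h
  have h2 := congrArg String.toList h
  simp at h2

theorem pvBneO (t : String) : "B-" ++ t ≠ "O" := by
  intro h
  have h2 := congrArg String.toList h
  simp at h2

theorem pvIneO (t : String) : "I-" ++ t ≠ "O" := by
  intro h
  have h2 := congrArg String.toList h
  simp at h2

theorem pv_mem_body {x : String} {ts : List String} :
    x ∈ pvBody ts ↔ ∃ t ∈ ts, x = "B-" ++ t ∨ x = "I-" ++ t := by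
  unfold pvBody
  rw [List.mem_flatMap]
  constructor
  · rintro ⟨t, ht, hx⟩; exact ⟨t, ht, by simpa using hx⟩
  · rintro ⟨t, ht, hx⟩; exact ⟨t, ht, by simpa using hx⟩

theorem pv_nodup_body : ∀ {ts : List String}, ts.Nodup → (pvBody ts).Nodup := by
  intro ts h
  induction ts with
  | nil => simp [pvBody]
  | cons t r ih =>
    rcases List.nodup_cons.mp h with ⟨hnt, hr⟩
    have hb : ("B-" ++ t) ∉ pvBody r := by
      intro hm
      rcases pv_mem_body.mp hm with ⟨t', ht', h' | h'⟩
      · exact hnt (by rw [pvBInj h']; exact ht')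
      · exact pvBneI t t' h'
    have hi : ("I-" ++ t) ∉ pvBody r := by
      intro hm
      rcases pv_mem_body.mp hm with ⟨t', ht', h' | h'⟩
      · exact pvBneI t' t h'.symm
      · exact hnt (by rw [pvIInj h']; exact ht')
    have hcons : pvBody (t :: r) = ("B-" ++ t) :: ("I-" ++ t) :: pvBody r := by
      simp [pvBody]
    rw [hcons]
    refine List.nodup_cons.mpr ⟨?_, List.nodup_cons.mpr ⟨hi, ih hr⟩⟩
    intro hm
    rcases List.mem_cons.mp hm with h' | h'
    · exact pvBneI t t h'
    · exact hb h'

-- both nested collection loops are a single fold over pvOcc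
theorem pv_nested {σ : Type} (f : σ → String → σ) :
    ∀ (data : List (List (String × List (List (String × String))))) (s : σ),
      data.foldl (fun s item =>
          ((PySem.Dict.mk item).getD "entities" []).foldl (fun s entity =>
            match (PySem.Dict.mk entity).get? "type" with
            | some t => f s t
            | none => s) s) s
        = (pvOcc data).foldl f s := by
  intro data
  induction data with
  | nil => intro s; rfl
  | cons item r ih =>
    intro s
    simp only [List.foldl_cons, pvOcc, List.flatMap_cons, List.foldl_append, ih]
    congr 1
    induction ((PySem.Dict.mk item).getD "entities" []) generalizing s with
    | nil => rfl
    | cons e es ihe =>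
      simp only [List.foldl_cons, List.filterMap_cons]
      cases hg : (PySem.Dict.mk e).get? "type" with
      | none => exact ihe s
      | some t => exact ihe (f s t)

theorem pv_mem_pvAdd {x t : String} : ∀ {o : List String}, x ∈ pvAdd o t ↔ x ∈ o ∨ x = t := by
  intro o
  induction o with
  | nil => simp [pvAdd]
  | cons h rest ih =>
    by_cases h1 : t < h
    · simp [pvAdd, h1]
      tauto
    · by_cases h2 : t = h
      · subst h2; simp [pvAdd]; tauto
      · simp [pvAdd, h1, h2, ih]; tauto

theorem pv_pvAdd_pairwise {t : String} :
    ∀ {o : List String}, o.Pairwise (· < ·) → (pvAdd o t).Pairwise (· < ·) := by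
  intro o
  induction o with
  | nil => intro _; simp [pvAdd]
  | cons h rest ih =>
    intro hp
    rcases List.pairwise_cons.mp hp with ⟨hh, hr⟩
    by_cases h1 : t < h
    · simp only [pvAdd, if_pos h1]
      exact List.pairwise_cons.mpr ⟨by
        intro y hy
        rcases List.mem_cons.mp hy with rfl | hy'
        · exact h1
        · exact lt_trans h1 (hh y hy'), hp⟩
    · by_cases h2 : t = h
      · simp only [pvAdd, if_neg h1, if_pos h2]; exact hp
      · have hlt : h < t := lt_of_le_of_ne (not_lt.mp h1) (Ne.symm h2)
        simp only [pvAdd, if_neg h1, if_neg h2]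
        refine List.pairwise_cons.mpr ⟨?_, ih hr⟩
        intro y hy
        rcases pv_mem_pvAdd.mp hy with hy' | rfl
        · exact hh y hy'
        · exact hlt

theorem pv_pvAdd_of_mem {t : String} :
    ∀ {o : List String}, t ∈ o → o.Pairwise (· < ·) → pvAdd o t = o := by
  intro o
  induction o with
  | nil => intro h; simp at h
  | cons h rest ih =>
    intro hm hp
    rcases List.pairwise_cons.mp hp with ⟨hh, hr⟩
    rcases List.mem_cons.mp hm with rfl | hm'
    · simp [pvAdd]
    · have hlt : h < t := hh t hm'
      have h1 : ¬ t < h := not_lt.mpr (le_of_lt hlt)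
      have h2 : t ≠ h := (ne_of_gt hlt)
      simp only [pvAdd, if_neg h1, if_neg h2]
      rw [ih hm' hr]

theorem pv_pvAdd_perm {t : String} :
    ∀ {o : List String}, t ∉ o → (pvAdd o t).Perm (t :: o) := by
  intro o
  induction o with
  | nil => intro _; simp [pvAdd]
  | cons h rest ih =>
    intro hnm
    have hne : t ≠ h := fun he => hnm (he ▸ List.mem_cons_self)
    have hnr : t ∉ rest := fun hr => hnm (List.mem_cons_of_mem _ hr)
    by_cases h1 : t < h
    · simp [pvAdd, h1]
    · simp only [pvAdd, if_neg h1, if_neg hne]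
      exact ((ih hnr).cons h).trans (List.Perm.swap t h rest)

-- invariant: B's ordered-insert fold stays sorted and is a permutation of A's set fold
theorem pv_fold_inv :
    ∀ (l : List String) (o : List String) (s : PySem.Set String),
      o.Pairwise (· < ·) → o.Perm s → s.Nodup →
      (l.foldl pvAdd o).Pairwise (· < ·) ∧ (l.foldl pvAdd o).Perm (l.foldl PySem.Set.add s) := by
  intro l
  induction l with
  | nil => intro o s hp hperm _; exact ⟨hp, hperm⟩
  | cons t r ih =>
    intro o s hp hperm hnd
    simp only [List.foldl_cons]
    by_cases hm : t ∈ o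
    · have hms : t ∈ s := hperm.mem_iff.mp hm
      have hadd : PySem.Set.add s t = s := by
        simp [PySem.Set.add, PySem.Set.contains, hms]
      rw [pv_pvAdd_of_mem hm hp, hadd]
      exact ih o s hp hperm hnd
    · have hms : t ∉ s := fun h => hm (hperm.mem_iff.mpr h)
      have hadd : PySem.Set.add s t = s ++ [t] := by
        simp [PySem.Set.add, PySem.Set.contains, hms]
      rw [hadd]
      have hp' := pv_pvAdd_pairwise (t := t) hp
      have hperm' : (pvAdd o t).Perm (s ++ [t]) :=
        (pv_pvAdd_perm hm).trans ((hperm.cons t).trans (List.perm_append_singleton t s).symm)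
      have hdisj : s.Disjoint [t] := by
        intro a ha hb
        rw [List.mem_singleton] at hb
        exact hms (hb ▸ ha)
      have hnd' : (s ++ [t]).Nodup := hnd.append (List.nodup_singleton t) hdisj
      exact ih _ _ hp' hperm' hnd'

-- B's pair list is A's enumerate-flatMap pair list
theorem pv_pairs_eq : ∀ (ts : List String) (i : Int),
    pvPairs ts i = (PySem.List.enumerate ts i).flatMap pvF := by
  intro ts
  induction ts with
  | nil => intro i; rfl
  | cons t r ih =>
    intro i
    rw [PySem.List.enumerate_cons]
    simp only [pvPairs, List.flatMap_cons, pvF, ih]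
    have e1 : 2 * i - 1 = i * 2 - 1 := by ring
    have e2 : 2 * i = i * 2 := by ring
    rw [e1, e2]
    rfl

theorem pv_map_fst_pvPairs : ∀ (ts : List String) (i : Int),
    (pvPairs ts i).map Prod.fst = pvBody ts := by
  intro ts
  induction ts with
  | nil => intro i; rfl
  | cons t r ih =>
    intro i
    simp only [pvPairs, List.map_cons, ih, pvBody, List.flatMap_cons]
    rfl

-- A's double-insert loop is the single-insert loop over the flattened pair list
theorem pvA1 : ∀ (l : List (Int × String)) (d : PySem.Dict String Int),
    l.foldl (fun m p => (m.insert ("B-" ++ p.2) (p.1 * 2 - 1)).insert ("I-" ++ p.2) (p.1 * 2)) d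
      = (l.flatMap pvF).foldl (fun m p => m.insert p.1 p.2) d := by
  intro l
  induction l with
  | nil => intro d; rfl
  | cons p r ih =>
    intro d
    simp only [List.foldl_cons, List.flatMap_cons, List.foldl_append, pvF, List.foldl_nil]
    exact ih _

theorem pvA2 : ∀ (l : List (Int × String)),
    (l.flatMap pvF).map Prod.fst = pvBody (l.map Prod.snd) := by
  intro l
  induction l with
  | nil => rfl
  | cons p r ih =>
    simp only [List.flatMap_cons, List.map_append, List.map_cons, ih]
    simp [pvF, pvBody]

theorem pv_itemsA (ts : List String) (h : ts.Nodup) :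
    ((PySem.List.enumerate ts 1).foldl
        (fun m p => (m.insert ("B-" ++ p.2) (p.1 * 2 - 1)).insert ("I-" ++ p.2) (p.1 * 2))
        (PySem.Dict.ofList [("O", 0)])).items
      = ("O", (0 : Int)) :: (PySem.List.enumerate ts 1).flatMap pvF := by
  rw [pvA1]
  have hmapfst : ((PySem.List.enumerate ts (1 : Int)).flatMap pvF).map Prod.fst = pvBody ts := by
    rw [pvA2, PySem.List.map_snd_enumerate]
  have h2 : (((PySem.List.enumerate ts (1 : Int)).flatMap pvF).map Prod.fst).Nodup := by
    rw [hmapfst]; exact pv_nodup_body h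
  have hkeys : (PySem.Dict.ofList [("O", (0 : Int))]).keys = ["O"] := by rfl
  have h1 : ∀ a ∈ (PySem.List.enumerate ts (1 : Int)).flatMap pvF,
      (PySem.Dict.ofList [("O", (0 : Int))]).contains a.1 = false := by
    intro a ha
    have hmem : a.1 ∈ pvBody ts := by
      rw [← hmapfst]; exact List.mem_map_of_mem ha
    rw [PySem.Dict.contains_eq_decide_mem_keys, hkeys]
    rcases pv_mem_body.mp hmem with ⟨t, _, h' | h'⟩
    · simp [h', pvBneO t]
    · simp [h', pvIneO t]
  have hfin := PySem.Dict.items_foldl_insert_fresh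
      (l := (PySem.List.enumerate ts (1 : Int)).flatMap pvF) (k := Prod.fst) (v := Prod.snd)
      (d := PySem.Dict.ofList [("O", (0 : Int))]) h1 h2
  simpa using hfin

-- dict(pairs) returns its pair list when the keys are distinct
theorem pv_itemsB (ts : List String) (h : ts.Nodup) :
    (PySem.Dict.ofList (("O", (0 : Int)) :: pvPairs ts 1)).items
      = ("O", (0 : Int)) :: pvPairs ts 1 := by
  have hmapfst : ((("O", (0 : Int)) :: pvPairs ts 1).map Prod.fst) = "O" :: pvBody ts := by
    simp [pv_map_fst_pvPairs]
  have h2 : ((("O", (0 : Int)) :: pvPairs ts 1).map Prod.fst).Nodup := by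
    rw [hmapfst]
    refine List.nodup_cons.mpr ⟨?_, pv_nodup_body h⟩
    intro hm
    rcases pv_mem_body.mp hm with ⟨t, _, h' | h'⟩
    · exact pvBneO t h'.symm
    · exact pvIneO t h'.symm
  have h1 : ∀ a ∈ ("O", (0 : Int)) :: pvPairs ts 1,
      (PySem.Dict.empty : PySem.Dict String Int).contains a.1 = false := by
    intro a _
    simp [PySem.Dict.contains_empty]
  have hfin := PySem.Dict.items_foldl_insert_fresh
      (l := ("O", (0 : Int)) :: pvPairs ts 1) (k := Prod.fst) (v := Prod.snd)
      (d := (PySem.Dict.empty : PySem.Dict String Int)) h1 h2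
  simpa using hfin

-- ===== VERDICT (by name: the statement is the Claim_ definition above) =====
theorem create_entity_mapping_spec : Claim_equal_create_entity_mapping := by
  intro data _
  show create_entity_mapping data = create_entity_mapping_alt data
  simp only [create_entity_mapping, create_entity_mapping_alt]
  rw [pv_nested, pv_nested]
  set S : PySem.Set String := (pvOcc data).foldl PySem.Set.add PySem.Set.empty with hS
  set O : List String := (pvOcc data).foldl pvAdd [] with hO
  have hSof : S = PySem.Set.ofList (pvOcc data) := by
    rw [hS, PySem.Set.ofList_eq_foldl]
    rfl
  have hSnd : S.Nodup := by rw [hSof]; exact PySem.Set.nodup_ofList _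
  obtain ⟨hOp, hOperm⟩ := pv_fold_inv (pvOcc data) [] PySem.Set.empty (by simp) (by rfl)
    (by simp [PySem.Set.empty])
  rw [← hS] at hOperm
  rw [← hO] at hOp hOperm
  have hsorted : PySem.List.sorted S (fun x => x) false = O := by
    apply PySem.List.sorted_eq_of_perm_of_pairwise_lt
    · exact hOperm
    · exact hOp
  have hOnd : O.Nodup := hOp.imp (fun h => ne_of_lt h)
  rw [hsorted, pv_itemsA O hOnd, pv_itemsB O hOnd, pv_pairs_eq]
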